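-- pv_equiv track=rewrite | github.com/thechaos16/project-Euler | python/86th_notcompleted.py | mostpyth
-- ===== SOURCE A (Python) =====
-- def pyth(n):
--         for i in range(1,n):
--                 for j in range(1,n):
--                         if i*i+j*j==n*n:
--                                 return [i,j]
--         return [-1,-1]
--
-- def mostpyth(n):
--         temp = n
--         while(1):
--                 li = pyth(temp)
--                 if li[0]==-1:
--                         temp-=1
--                         continue
--                 return [li[0],li[1],temp]
-- ===== SOURCE B (Python) =====
-- def mostpyth(n):
--     temp = n
--     while True:
--         # two-pointer search for the lexicographically-first leg pair of temp
--         i, j = 1, temp - 1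
--         found = None
--         while i < temp and j >= 1:
--             s = i * i + j * j
--             if s == temp * temp:
--                 found = (i, j)
--                 break
--             if s > temp * temp:
--                 j -= 1
--             else:
--                 i += 1
--         if found is not None:
--             return [found[0], found[1], temp]
--         temp -= 1
-- ===== Notes on version B (the rewrite author's own statement) =====
-- stated objective: faster
-- what changed: Replaces the quadratic double loop over all (i,j) pairs per candidate hypotenuse with a linear two-pointer scan (i ascending, j descending) that finds the same first leg pair.
import Mathlib
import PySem

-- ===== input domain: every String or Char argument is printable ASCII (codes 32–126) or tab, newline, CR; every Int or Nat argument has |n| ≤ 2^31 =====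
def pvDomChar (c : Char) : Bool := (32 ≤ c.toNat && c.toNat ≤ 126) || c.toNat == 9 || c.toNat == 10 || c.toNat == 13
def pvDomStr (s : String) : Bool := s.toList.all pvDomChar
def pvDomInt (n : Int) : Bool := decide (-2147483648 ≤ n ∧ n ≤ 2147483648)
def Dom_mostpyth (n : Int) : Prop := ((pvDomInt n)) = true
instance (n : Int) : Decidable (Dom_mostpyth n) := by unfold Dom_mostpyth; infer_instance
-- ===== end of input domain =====

-- B replaces A's quadratic double loop per candidate hypotenuse with a linear two-pointer
-- scan that returns the same first leg pair (for n < 5 both Pythons loop forever; the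
-- fuelled ports agree everywhere).


-- ===== PORT A =====
-- inner 'for j in range(1,n): if i*i+j*j==n*n: return [i,j]'
def pythInner (n i : Int) : List Int → Option Int
  | [] => none
  | j :: rest => if i * i + j * j = n * n then some j else pythInner n i rest

-- outer 'for i in range(1,n): …'; falls through to [-1,-1]
def pythOuter (n : Int) : List Int → List Int
  | [] => [-1, -1]
  | i :: rest =>
    match pythInner n i (PySem.List.pyRange 1 n 1) with
    | some j => [i, j]
    | none => pythOuter n rest

def pyth (n : Int) : List Int := pythOuter n (PySem.List.pyRange 1 n 1)

-- 'while(1): li = pyth(temp); if li[0]==-1: temp-=1; continue; return …'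
-- Python's loop is unbounded; fuel n.toNat + 1 suffices on Pre_ (temp never drops below 5).
def mostLoop : Nat → Int → List Int
  | 0, _ => []
  | f + 1, temp =>
    let li := pyth temp
    if PySem.List.pyGetD li 0 0 = -1 then mostLoop f (temp - 1)
    else [PySem.List.pyGetD li 0 0, PySem.List.pyGetD li 1 0, temp]

def mostpyth (n : Int) : List Int := mostLoop (n.toNat + 1) n

-- ===== PORT B =====
-- 'while i < temp and j >= 1: …' two-pointer scan from Source B
def twoPtr (m i j : Int) : Option (Int × Int) :=
  if h : i < m ∧ 1 ≤ j then
    if i * i + j * j = m * m then some (i, j)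
    else if i * i + j * j > m * m then twoPtr m i (j - 1)
    else twoPtr m (i + 1) j
  else none
termination_by (m - i + j).toNat
decreasing_by all_goals omega

def mostLoopB : Nat → Int → List Int
  | 0, _ => []
  | f + 1, temp =>
    match twoPtr temp 1 (temp - 1) with
    | some (i, j) => [i, j, temp]
    | none => mostLoopB f (temp - 1)

def mostpyth_alt (n : Int) : List Int := mostLoopB (n.toNat + 1) n

-- ===== PRECONDITION & SPEC =====
def Spec_mostpyth (n : Int) (out : List Int) : Prop := out = mostpyth_alt n
instance (n : Int) (out : List Int) : Decidable (Spec_mostpyth n out) := by unfold Spec_mostpyth; infer_instance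

-- ===== CLAIM (what is proved, stated in full; the proofs are below) =====
def Claim_equal_mostpyth : Prop := ∀ (n : Int), Dom_mostpyth n → Spec_mostpyth n (mostpyth n)

-- ===== LEMMAS AND PROOFS =====

-- solutions with fixed first leg have a unique positive second leg
theorem pv_uniq {m i b b' : Int} (hb : 1 ≤ b) (hb' : 1 ≤ b')
    (h : i * i + b * b = m * m) (h' : i * i + b' * b' = m * m) : b = b' := by
  nlinarith [sq_nonneg (b - b'), sq_nonneg (b + b')]

-- characterization of the inner scan over a list of positive candidates
theorem pythInner_some_iff {m i : Int} {l : List Int} (hl : ∀ x ∈ l, 1 ≤ x) {j : Int} :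
    pythInner m i l = some j ↔ j ∈ l ∧ i * i + j * j = m * m := by
  induction l with
  | nil => simp [pythInner]
  | cons h t ih =>
    by_cases hc : i * i + h * h = m * m
    · simp only [pythInner, if_pos hc]
      constructor
      · rintro ⟨rfl⟩; exact ⟨List.mem_cons_self, hc⟩
      · rintro ⟨hmem, heq⟩
        rcases List.mem_cons.mp hmem with rfl | hmt
        · rfl
        · exact congrArg some (pv_uniq (hl _ (List.mem_cons_of_mem _ hmt)) (hl _ List.mem_cons_self) heq hc).symm
    · simp only [pythInner, if_neg hc]
      rw [ih (fun x hx => hl x (List.mem_cons_of_mem _ hx))]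
      constructor
      · rintro ⟨hmem, heq⟩; exact ⟨List.mem_cons_of_mem _ hmem, heq⟩
      · rintro ⟨hmem, heq⟩
        rcases List.mem_cons.mp hmem with rfl | hmt
        · exact absurd heq hc
        · exact ⟨hmt, heq⟩

theorem pythInner_none_iff {m i : Int} {l : List Int} (hl : ∀ x ∈ l, 1 ≤ x) :
    pythInner m i l = none ↔ ∀ j ∈ l, i * i + j * j ≠ m * m := by
  constructor
  · intro h j hj heq
    have := (pythInner_some_iff hl).mpr ⟨hj, heq⟩
    rw [h] at this; simp at this
  · intro h
    cases hs : pythInner m i l with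
    | none => rfl
    | some j =>
      have := (pythInner_some_iff hl).mp hs
      exact absurd this.2 (h j this.1)

-- outer scan: either no solution along l, or the first solution (minimal first leg)
theorem pythOuter_ex (m : Int) (l : List Int)
    (hpos : ∀ x ∈ l, 1 ≤ x) (hsort : l.Pairwise (· < ·)) :
    (pythOuter m l = [-1, -1] ∧
      ∀ a ∈ l, ∀ b, 1 ≤ b → b < m → a * a + b * b ≠ m * m) ∨
    (∃ a b, pythOuter m l = [a, b] ∧ a ∈ l ∧ 1 ≤ b ∧ b < m ∧ a * a + b * b = m * m ∧
      ∀ a' ∈ l, (∃ b', 1 ≤ b' ∧ b' < m ∧ a' * a' + b' * b' = m * m) → a ≤ a') := by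
  induction l with
  | nil => exact Or.inl ⟨rfl, by simp⟩
  | cons h t ih =>
    have hposr : ∀ x ∈ PySem.List.pyRange 1 m 1, 1 ≤ x := by
      intro x hx; exact ((PySem.List.mem_pyRange_one).mp hx).1
    have hpost : ∀ x ∈ t, 1 ≤ x := fun x hx => hpos x (List.mem_cons_of_mem _ hx)
    have hsortt : t.Pairwise (· < ·) := hsort.of_cons
    cases hin : pythInner m h (PySem.List.pyRange 1 m 1) with
    | some b =>
      right
      have hb := (pythInner_some_iff hposr).mp hin
      have hbmem := PySem.List.mem_pyRange_one.mp hb.1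
      refine ⟨h, b, ?_, List.mem_cons_self, hbmem.1, hbmem.2, hb.2, ?_⟩
      · simp [pythOuter, hin]
      · intro a' ha' _
        rcases List.mem_cons.mp ha' with rfl | hmt
        · exact le_refl _
        · exact le_of_lt ((List.pairwise_cons.mp hsort).1 _ hmt)
    | none =>
      have hnone : ∀ b, 1 ≤ b → b < m → h * h + b * b ≠ m * m := by
        intro b hb1 hbm heq
        exact ((pythInner_none_iff hposr).mp hin) b
          (PySem.List.mem_pyRange_one.mpr ⟨hb1, hbm⟩) heq
      rcases ih hpost hsortt with ⟨hres, hno⟩ | ⟨a, b, hres, hmem, hb1, hbm, heq, hmin⟩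
      · left
        refine ⟨by simp [pythOuter, hin, hres], ?_⟩
        intro a ha b hb1 hbm
        rcases List.mem_cons.mp ha with rfl | hmt
        · exact hnone b hb1 hbm
        · exact hno a hmt b hb1 hbm
      · right
        refine ⟨a, b, by simp [pythOuter, hin, hres], List.mem_cons_of_mem _ hmem,
          hb1, hbm, heq, ?_⟩
        intro a' ha' hsol
        rcases List.mem_cons.mp ha' with rfl | hmt
        · rcases hsol with ⟨b', hb'1, hb'm, heq'⟩
          exact absurd heq' (hnone b' hb'1 hb'm)
        · exact hmin a' hmt hsol

-- two-pointer scan: either no solution at all (with legs ≥ 1, first leg < m),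
-- or the minimal-first-leg solution
theorem twoPtr_ex (m : Int) : ∀ i j : Int, 1 ≤ i →
    (∀ a b, 1 ≤ a → 1 ≤ b → a < m → a * a + b * b = m * m → i ≤ a ∧ b ≤ j) →
    (twoPtr m i j = none ∧
      ∀ a b, 1 ≤ a → 1 ≤ b → a < m → a * a + b * b ≠ m * m) ∨
    (∃ a b, twoPtr m i j = some (a, b) ∧ 1 ≤ a ∧ 1 ≤ b ∧ a < m ∧ a * a + b * b = m * m ∧
      ∀ a' b', 1 ≤ a' → 1 ≤ b' → a' < m → a' * a' + b' * b' = m * m → a ≤ a') := by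
  intro i j
  induction i, j using twoPtr.induct m with
  | case1 i j h heq =>
    intro hi1 hinv
    right
    exact ⟨i, j, by rw [twoPtr]; simp [h, heq], hi1, h.2, h.1, heq,
      fun a' b' ha' hb' ham heq' => (hinv a' b' ha' hb' ham heq').1⟩
  | case2 i j h heq hgt ih =>
    intro hi1 hinv
    have hstep : ∀ a b, 1 ≤ a → 1 ≤ b → a < m → a * a + b * b = m * m → i ≤ a ∧ b ≤ j - 1 := by
      intro a b ha hb ham hab
      obtain ⟨hia, hbj⟩ := hinv a b ha hb ham hab
      refine ⟨hia, ?_⟩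
      rcases lt_or_eq_of_le hbj with hlt | rfl
      · omega
      · exfalso; nlinarith
    rcases ih hi1 hstep with ⟨hres, hno⟩ | ⟨a, b, hres, hrest⟩
    · left; exact ⟨by rw [twoPtr]; simp [h, heq, hgt, hres], hno⟩
    · right; exact ⟨a, b, by rw [twoPtr]; simp [h, heq, hgt, hres], hrest⟩
  | case3 i j h heq hle ih =>
    intro hi1 hinv
    have hstep : ∀ a b, 1 ≤ a → 1 ≤ b → a < m → a * a + b * b = m * m → i + 1 ≤ a ∧ b ≤ j := by
      intro a b ha hb ham hab
      obtain ⟨hia, hbj⟩ := hinv a b ha hb ham hab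
      refine ⟨?_, hbj⟩
      rcases lt_or_eq_of_le hia with hlt | rfl
      · omega
      · exfalso
        have hbb : b * b ≤ j * j := by nlinarith
        have hslt : i * i + j * j < m * m := lt_of_le_of_ne (not_lt.mp hle) heq
        nlinarith
    rcases ih (by omega) hstep with ⟨hres, hno⟩ | ⟨a, b, hres, hrest⟩
    · left; exact ⟨by rw [twoPtr]; simp [h, heq, hle, hres], hno⟩
    · right; exact ⟨a, b, by rw [twoPtr]; simp [h, heq, hle, hres], hrest⟩
  | case4 i j h =>
    intro hi1 hinv
    left
    refine ⟨by rw [twoPtr]; simp [h], ?_⟩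
    intro a b ha hb ham heq
    obtain ⟨hia, hbj⟩ := hinv a b ha hb ham heq
    exact h ⟨by omega, by omega⟩

-- with legs ≥ 1 and first leg < m, the second leg is also < m
theorem pv_bleg {m a b : Int} (ha : 1 ≤ a) (hb : 1 ≤ b) (ham : a < m)
    (heq : a * a + b * b = m * m) : b < m := by nlinarith

-- per-candidate agreement of the two searches
theorem pyth_cases (m : Int) :
    (pyth m = [-1, -1] ∧ twoPtr m 1 (m - 1) = none) ∨
    (∃ a b, 1 ≤ a ∧ pyth m = [a, b] ∧ twoPtr m 1 (m - 1) = some (a, b)) := by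
  have hpos : ∀ x ∈ PySem.List.pyRange 1 m 1, 1 ≤ x :=
    fun x hx => ((PySem.List.mem_pyRange_one).mp hx).1
  have hsort := PySem.List.pairwise_lt_pyRange_one (a := 1) (b := m)
  have hinv : ∀ a b, 1 ≤ a → 1 ≤ b → a < m → a * a + b * b = m * m → 1 ≤ a ∧ b ≤ m - 1 := by
    intro a b ha hb ham heq
    exact ⟨ha, by have := pv_bleg ha hb ham heq; omega⟩
  rcases pythOuter_ex m (PySem.List.pyRange 1 m 1) hpos hsort with
    ⟨hA, hAno⟩ | ⟨a, b, hA, hAmem, hAb1, hAbm, hAeq, hAmin⟩ <;>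
  rcases twoPtr_ex m 1 (m - 1) (le_refl 1) hinv with
    ⟨hB, hBno⟩ | ⟨a', b', hB, hB1, hBb1, hBam, hBeq, hBmin⟩
  · exact Or.inl ⟨hA, hB⟩
  · exfalso
    have hb'm := pv_bleg hB1 hBb1 hBam hBeq
    exact hAno a' (PySem.List.mem_pyRange_one.mpr ⟨hB1, hBam⟩) b' hBb1 hb'm hBeq
  · exfalso
    have hamem := PySem.List.mem_pyRange_one.mp hAmem
    exact hBno a b hamem.1 hAb1 hamem.2 hAeq
  · have hamem := PySem.List.mem_pyRange_one.mp hAmem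
    have h1 : a ≤ a' := hAmin a' (PySem.List.mem_pyRange_one.mpr ⟨hB1, hBam⟩)
      ⟨b', hBb1, pv_bleg hB1 hBb1 hBam hBeq, hBeq⟩
    have h2 : a' ≤ a := hBmin a b hamem.1 hAb1 hamem.2 hAeq
    have hae : a = a' := le_antisymm h1 h2
    subst hae
    have hbe : b = b' := pv_uniq hAb1 hBb1 hAeq hBeq
    subst hbe
    exact Or.inr ⟨a, b, hamem.1, hA, hB⟩

theorem mostLoop_eq (fuel : Nat) : ∀ temp : Int, mostLoop fuel temp = mostLoopB fuel temp := by
  induction fuel with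
  | zero => intro temp; rfl
  | succ f ih =>
    intro temp
    rcases pyth_cases temp with ⟨hA, hB⟩ | ⟨a, b, ha1, hA, hB⟩
    · simp [mostLoop, mostLoopB, hA, hB, PySem.List.pyGetD, ih]
    · have hne : a ≠ -1 := by omega
      simp [mostLoop, mostLoopB, hA, hB, PySem.List.pyGetD, hne]

-- ===== VERDICT (by name: the statement is the Claim_ definition above) =====
theorem mostpyth_spec : Claim_equal_mostpyth := by
  intro n _
  unfold Spec_mostpyth mostpyth mostpyth_alt
  exact mostLoop_eq _ n
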